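-- pv_equiv track=rewrite | github.com/alex17-sys/stdlib-sniper | snippets_py/math/is_even_odd_demo.py | product_even_odd
-- ===== SOURCE A (Python) =====
-- def is_even(number):
--     """Check if number is even."""
--     return number % 2 == 0
--
-- def product_even_odd(numbers):
--     """Calculate product of even and odd numbers separately."""
--     even_product = 1
--     odd_product = 1
--
--     for n in numbers:
--         if is_even(n):
--             even_product *= n
--         else:
--             odd_product *= n
--
--     return even_product, odd_product
-- ===== SOURCE B (Python) =====
-- import math
--
-- def product_even_odd(numbers):
--     """Calculate product of even and odd numbers separately."""
--     evens = [n for n in numbers if n % 2 == 0]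
--     odds = [n for n in numbers if n % 2 != 0]
--     return math.prod(evens), math.prod(odds)
-- ===== Notes on version B (the rewrite author's own statement) =====
-- stated objective: idiomatic
-- what changed: Replaces the single interleaved accumulation loop with a partition-then-reduce decomposition: filter the evens and odds into two lists and reduce each with math.prod.
import Mathlib
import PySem

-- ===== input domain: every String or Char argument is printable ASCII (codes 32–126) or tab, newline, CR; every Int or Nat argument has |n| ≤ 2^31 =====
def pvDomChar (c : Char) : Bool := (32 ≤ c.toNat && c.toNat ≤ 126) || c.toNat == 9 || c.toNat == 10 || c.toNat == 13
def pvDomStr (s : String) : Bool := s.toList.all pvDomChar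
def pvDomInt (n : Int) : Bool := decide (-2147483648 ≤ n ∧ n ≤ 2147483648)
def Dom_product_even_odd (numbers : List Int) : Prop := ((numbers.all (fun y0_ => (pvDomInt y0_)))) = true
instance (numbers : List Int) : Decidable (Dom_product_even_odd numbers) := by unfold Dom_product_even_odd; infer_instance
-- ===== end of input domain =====

-- B replaces A's interleaved accumulation loop by filtering evens and odds and reducing each with math.prod (idiomatic decomposition).

-- ===== PORT A =====
def is_even (number : Int) : Bool := PySem.Int.mod number 2 == 0

def product_even_odd (numbers : List Int) : Int × Int :=
  numbers.foldl
    (fun (acc : Int × Int) n =>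
      if is_even n then (acc.1 * n, acc.2) else (acc.1, acc.2 * n))
    (1, 1)

-- ===== PORT B =====
def product_even_odd_alt (numbers : List Int) : Int × Int :=
  ((numbers.filter (fun n => PySem.Int.mod n 2 == 0)).prod,
   (numbers.filter (fun n => PySem.Int.mod n 2 != 0)).prod)

-- ===== PRECONDITION & SPEC =====
def Spec_product_even_odd (numbers : List Int) (out : Int × Int) : Prop := out = product_even_odd_alt numbers
instance (numbers : List Int) (out : Int × Int) : Decidable (Spec_product_even_odd numbers out) := by unfold Spec_product_even_odd; infer_instance

-- ===== CLAIM (what is proved, stated in full; the proofs are below) =====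
def Claim_equal_product_even_odd : Prop := ∀ (numbers : List Int), Dom_product_even_odd numbers → Spec_product_even_odd numbers (product_even_odd numbers)

-- ===== LEMMAS AND PROOFS =====
theorem pv_fold_eq (numbers : List Int) (e o : Int) :
    numbers.foldl
      (fun (acc : Int × Int) n =>
        if is_even n then (acc.1 * n, acc.2) else (acc.1, acc.2 * n))
      (e, o)
    = (e * (numbers.filter (fun n => PySem.Int.mod n 2 == 0)).prod,
       o * (numbers.filter (fun n => PySem.Int.mod n 2 != 0)).prod) := by
  induction numbers generalizing e o with
  | nil => simp
  | cons h t ih =>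
    simp only [List.foldl_cons, List.filter_cons]
    by_cases hc : is_even h = true
    · rw [if_pos hc]
      have hc' : (PySem.Int.mod h 2 == 0) = true := hc
      simp only [hc', bne, Bool.not_true, Bool.false_eq_true, ite_true, ite_false]
      rw [ih]
      simp [bne, mul_comm, mul_left_comm, mul_assoc]
    · rw [if_neg hc]
      have hc' : (PySem.Int.mod h 2 == 0) = false := by
        simpa [is_even] using hc
      simp only [hc', bne, Bool.not_false, Bool.false_eq_true, ite_true, ite_false]
      rw [ih]
      simp [bne, mul_comm, mul_left_comm, mul_assoc]

-- ===== VERDICT (by name: the statement is the Claim_ definition above) =====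
theorem product_even_odd_spec : Claim_equal_product_even_odd := by
  intro numbers _
  unfold Spec_product_even_odd product_even_odd product_even_odd_alt
  rw [pv_fold_eq]
  simp
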